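-- pv_equiv track=rewrite | github.com/alecristia/CDSwordSeg | algoComp/scripts/evalGold.py | words_stringpos
-- ===== SOURCE A (Python) =====
-- def words_stringpos(ws):
--     stringpos = set()
--     left = 0
--     for w in ws:
--         right = left+len(w)
--         stringpos.add((left,right))
--         left = right
--     return stringpos
-- ===== SOURCE B (Python) =====
-- def words_stringpos(ws):
--     # Divide and conquer: solve each half independently (pairs relative to its
--     # own start), then shift the right half's pairs by the left half's total
--     # length and union the two sets.
--     def solve(sub):
--         if len(sub) == 1:
--             n = len(sub[0])
--             return {(0, n)}, n
--         mid = len(sub) // 2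
--         left, ln = solve(sub[:mid])
--         right, rn = solve(sub[mid:])
--         return left | {(a + ln, b + ln) for (a, b) in right}, ln + rn
--     return solve(ws)[0] if ws else set()
-- ===== Notes on version B (the rewrite author's own statement) =====
-- stated objective: alternative
-- what changed: Replaces A's single forward pass with a threaded running offset by divide and conquer: each half of the list is solved independently relative to its own start, then the right half's pairs are shifted by the left half's total length and the two sets are unioned.
import Mathlib
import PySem

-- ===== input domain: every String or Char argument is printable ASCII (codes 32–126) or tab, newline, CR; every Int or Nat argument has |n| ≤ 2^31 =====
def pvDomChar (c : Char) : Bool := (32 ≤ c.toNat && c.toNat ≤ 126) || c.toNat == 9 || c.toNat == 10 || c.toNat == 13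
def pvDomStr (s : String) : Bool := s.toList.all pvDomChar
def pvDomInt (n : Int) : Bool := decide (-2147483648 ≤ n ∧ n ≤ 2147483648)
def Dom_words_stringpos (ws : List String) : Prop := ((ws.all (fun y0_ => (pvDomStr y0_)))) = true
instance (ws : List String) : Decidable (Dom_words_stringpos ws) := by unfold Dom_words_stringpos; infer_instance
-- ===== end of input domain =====

-- B replaces A's forward scan with a threaded running offset by divide and conquer:
-- solve each half relative to its own start, shift the right half, union (alternative, same result).

-- ===== PORT A =====
-- stringpos = set(); left = 0; for w in ws: right = left+len(w); stringpos.add((left,right)); left = right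
def words_stringpos (ws : List String) : List (Int × Int) :=
  (ws.foldl (fun (st : PySem.Set (Int × Int) × Int) w =>
      let right := st.2 + PySem.Str.len w
      (PySem.Set.add st.1 (st.2, right), right)) (PySem.Set.empty, 0)).1

-- ===== PORT B =====
-- def solve(sub): if len(sub)==1: n=len(sub[0]); return {(0,n)}, n
--   mid=len(sub)//2; left,ln=solve(sub[:mid]); right,rn=solve(sub[mid:])
--   return left | {(a+ln,b+ln) for (a,b) in right}, ln+rn
-- Python's solve is only ever called on nonempty sublists; the [] branch makes the
-- recursion total and is unreachable from words_stringpos_alt.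
-- (the set comprehension over the recursive set maps an injective shift, so the
-- resulting SET does not depend on Python's hash iteration order)
def pvSolve (sub : List String) : List (Int × Int) × Int :=
  match sub with
  | [] => (PySem.Set.empty, 0)
  | [w] =>
    let n := PySem.Str.len w
    (PySem.Set.ofList [((0 : Int), n)], n)
  | w1 :: w2 :: rest =>
    let mid := (w1 :: w2 :: rest).length / 2
    let L := pvSolve ((w1 :: w2 :: rest).take mid)
    let R := pvSolve ((w1 :: w2 :: rest).drop mid)
    (PySem.Set.union L.1 (PySem.Set.ofList (R.1.map (fun p => (p.1 + L.2, p.2 + L.2)))),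
     L.2 + R.2)
termination_by sub.length
decreasing_by
  · simp only [List.length_take]; simp only [List.length]; omega
  · simp only [List.length_drop]; simp only [List.length]; omega

-- return solve(ws)[0] if ws else set()
def words_stringpos_alt (ws : List String) : List (Int × Int) :=
  match ws with
  | [] => PySem.Set.empty
  | _ => (pvSolve ws).1

-- ===== PRECONDITION & SPEC =====
def Spec_words_stringpos (ws : List String) (out : List (Int × Int)) : Prop := out = words_stringpos_alt ws
instance (ws : List String) (out : List (Int × Int)) : Decidable (Spec_words_stringpos ws out) := by unfold Spec_words_stringpos; infer_instance

-- ===== CLAIM (what is proved, stated in full; the proofs are below) =====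
def Claim_equal_words_stringpos : Prop := ∀ (ws : List String), Dom_words_stringpos ws → Spec_words_stringpos ws (words_stringpos ws)

-- ===== LEMMAS AND PROOFS =====

/-- The list of (start,end) pairs of the words of `ws` starting at offset `l`. -/
def pvPairs (ws : List String) (l : Int) : List (Int × Int) :=
  match ws with
  | [] => []
  | w :: ws' => (l, l + PySem.Str.len w) :: pvPairs ws' (l + PySem.Str.len w)

theorem pvA_foldl (ws : List String) (s : PySem.Set (Int × Int)) (l : Int) :
    (ws.foldl (fun (st : PySem.Set (Int × Int) × Int) w =>
      let right := st.2 + PySem.Str.len w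
      (PySem.Set.add st.1 (st.2, right), right)) (s, l)).1
    = (pvPairs ws l).foldl PySem.Set.add s := by
  induction ws generalizing s l with
  | nil => rfl
  | cons w ws ih => simp only [pvPairs, List.foldl]; exact ih _ _

/-- Deduplicating after a map agrees with deduplicating before it (any `f`). -/
theorem pvOfList_map_ofList {α β : Type} [BEq α] [LawfulBEq α] [BEq β] [LawfulBEq β]
    (f : α → β) (L : List α) :
    PySem.Set.ofList ((PySem.Set.ofList L).map f) = PySem.Set.ofList (L.map f) := by
  induction L using List.reverseRecOn with
  | nil => rfl
  | append_singleton L x ih =>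
    rw [PySem.Set.ofList_append_singleton]
    by_cases hx : x ∈ PySem.Set.ofList L
    · rw [PySem.Set.add_of_mem hx, ih, List.map_append, List.map_singleton,
        PySem.Set.ofList_append_singleton,
        PySem.Set.add_of_mem]
      rw [PySem.Set.mem_ofList]
      exact List.mem_map_of_mem ((PySem.Set.mem_ofList L x).1 hx)
    · rw [PySem.Set.add_of_not_mem hx, List.map_append, List.map_singleton,
        PySem.Set.ofList_append_singleton, List.map_append, List.map_singleton,
        PySem.Set.ofList_append_singleton, ih]

/-- Updating by a list or by its dedup is the same. -/
theorem pvUpdate_ofList {α : Type} [BEq α] [LawfulBEq α] (s : PySem.Set α) (xs : List α) :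
    PySem.Set.update s (PySem.Set.ofList xs) = PySem.Set.update s xs := by
  rw [PySem.Set.update_eq_append_filter, PySem.Set.update_eq_append_filter,
    PySem.Set.ofList_ofList]

/-- Shifting all pairs shifts the starting offset. -/
theorem pvPairs_shift (ws : List String) (l n : Int) :
    (pvPairs ws l).map (fun p => (p.1 + n, p.2 + n)) = pvPairs ws (l + n) := by
  induction ws generalizing l with
  | nil => rfl
  | cons w ws ih =>
    have h : l + PySem.Str.len w + n = l + n + PySem.Str.len w := by ring
    simp only [pvPairs, List.map_cons, ih, h]

theorem pvPairs_append (l1 l2 : List String) (l : Int) :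
    pvPairs (l1 ++ l2) l = pvPairs l1 l ++ pvPairs l2 (l + (l1.map PySem.Str.len).sum) := by
  induction l1 generalizing l with
  | nil => simp [pvPairs]
  | cons w l1 ih =>
    have h : l + PySem.Str.len w + (l1.map PySem.Str.len).sum
        = l + (PySem.Str.len w + (l1.map PySem.Str.len).sum) := by ring
    simp only [List.cons_append, pvPairs, ih, List.map_cons, List.sum_cons, h]

/-- `solve` on a nonempty sublist returns the deduped pair list and the total length. -/
theorem pvSolve_spec (sub : List String) (hne : sub ≠ []) :
    pvSolve sub = (PySem.Set.ofList (pvPairs sub 0), (sub.map PySem.Str.len).sum) := by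
  revert hne
  induction sub using pvSolve.induct with
  | case1 => exact fun hne => absurd rfl hne
  | case2 w =>
    intro _
    simp [pvSolve, pvPairs, PySem.Set.ofList]
  | case3 w1 w2 rest _mid ih1 ih2 =>
    intro _
    have hmidpos : 1 ≤ (w1 :: w2 :: rest).length / 2 := by
      simp only [List.length]; omega
    have hmidlt : (w1 :: w2 :: rest).length / 2 < (w1 :: w2 :: rest).length := by
      simp only [List.length]; omega
    have htake : (w1 :: w2 :: rest).take ((w1 :: w2 :: rest).length / 2) ≠ [] := by
      intro h
      have := congrArg List.length h
      simp only [List.length_take, List.length_nil] at this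
      omega
    have hdrop : (w1 :: w2 :: rest).drop ((w1 :: w2 :: rest).length / 2) ≠ [] := by
      intro h
      have := congrArg List.length h
      simp only [List.length_drop, List.length_nil] at this
      omega
    rw [pvSolve, ih1 htake, ih2 hdrop]
    have hsplit : (w1 :: w2 :: rest) =
        (w1 :: w2 :: rest).take ((w1 :: w2 :: rest).length / 2)
        ++ (w1 :: w2 :: rest).drop ((w1 :: w2 :: rest).length / 2) :=
      (List.take_append_drop _ _).symm
    set t := (w1 :: w2 :: rest).take ((w1 :: w2 :: rest).length / 2) with ht
    set d := (w1 :: w2 :: rest).drop ((w1 :: w2 :: rest).length / 2) with hd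
    refine Prod.ext ?_ ?_
    · show PySem.Set.union (PySem.Set.ofList (pvPairs t 0))
        (PySem.Set.ofList ((PySem.Set.ofList (pvPairs d 0)).map
          (fun p => (p.1 + (t.map PySem.Str.len).sum, p.2 + (t.map PySem.Str.len).sum))))
        = PySem.Set.ofList (pvPairs (w1 :: w2 :: rest) 0)
      show PySem.Set.update _ _ = _
      rw [pvUpdate_ofList, ← pvUpdate_ofList, pvOfList_map_ofList, pvUpdate_ofList,
        pvPairs_shift, zero_add]
      conv_rhs => rw [hsplit]
      rw [pvPairs_append, PySem.Set.ofList_append, zero_add]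
    · show (t.map PySem.Str.len).sum + (d.map PySem.Str.len).sum
        = ((w1 :: w2 :: rest).map PySem.Str.len).sum
      conv_rhs => rw [hsplit]
      rw [List.map_append, List.sum_append]

-- ===== VERDICT (by name: the statement is the Claim_ definition above) =====
theorem words_stringpos_spec : Claim_equal_words_stringpos := by
  intro ws _
  unfold Spec_words_stringpos words_stringpos words_stringpos_alt
  match ws with
  | [] => rfl
  | w :: ws' =>
    rw [pvA_foldl, pvSolve_spec (w :: ws') (by simp), PySem.Set.ofList_eq_foldl]
    rfl
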